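-- pv_equiv track=rewrite | github.com/wyk18703232953/myResearch | codeComplex/data copy/filteredData/python/cubic/python_cubic_0528.py | solve
-- ===== SOURCE A (Python) =====
-- from collections import Counter
--
-- def mx(f):
--     res = []
--     for k in sorted(f.keys(), reverse=True):
--         for _ in range(f[k]):
--             res.append(k)
--     return res
--
-- def solve(n, a, b):
--     res = None
--     for k in range(n + 1):
--         aa = Counter(a)
--         cur = []
--         for i in range(k):
--             if aa[b[i]] == 0:
--                 return res
--             cur.append(b[i])
--             aa[b[i]] -= 1
--         if k < n:
--             for e in range(b[k] - 1, -1, -1):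
--                 if aa[e] > 0:
--                     cur.append(e)
--                     aa[e] -= 1
--                     cur.extend(mx(aa))
--                     break
--             if len(cur) < n:
--                 continue
--         res = cur
--     return res
-- ===== SOURCE B (Python) =====
-- from collections import Counter
--
--
-- def solve(n, a, b):
--     # One pass: grow the matched prefix of b greedily with a single shared
--     # counter, then walk the feasible prefix length downward, handing elements
--     # back, until a position admits a smaller filler digit.
--     if n < 0:
--         return None
--     cnt = Counter(a)
--     K = 0
--     while K < n and cnt[b[K]] > 0:
--         cnt[b[K]] -= 1
--         K += 1
--     if K == n:
--         return b[:n]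
--     if len(a) < n:
--         return None
--     # cnt now holds the multiset a minus the prefix b[:K]
--     for k in range(K, -1, -1):
--         # largest value e with 0 <= e < b[k] still available
--         cands = [v for v in cnt if cnt[v] > 0 and 0 <= v < b[k]]
--         if cands:
--             e = max(cands)
--             cnt[e] -= 1
--             tail = sorted(cnt.elements(), reverse=True)
--             return b[:k] + [e] + tail
--         if k > 0:
--             cnt[b[k - 1]] += 1  # hand the prefix element back
--     return None
-- ===== Notes on version B (the rewrite author's own statement) =====
-- stated objective: faster
-- what changed: A rebuilds Counter(a) and re-consumes the whole prefix for every candidate length k and scans the value range b[k]-1..0 for a filler; B computes the maximal feasible prefix once with one shared counter, then walks k downward handing elements back, picking the filler as the max over the counter's keys and returning at the first feasible k.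
import Mathlib
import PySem

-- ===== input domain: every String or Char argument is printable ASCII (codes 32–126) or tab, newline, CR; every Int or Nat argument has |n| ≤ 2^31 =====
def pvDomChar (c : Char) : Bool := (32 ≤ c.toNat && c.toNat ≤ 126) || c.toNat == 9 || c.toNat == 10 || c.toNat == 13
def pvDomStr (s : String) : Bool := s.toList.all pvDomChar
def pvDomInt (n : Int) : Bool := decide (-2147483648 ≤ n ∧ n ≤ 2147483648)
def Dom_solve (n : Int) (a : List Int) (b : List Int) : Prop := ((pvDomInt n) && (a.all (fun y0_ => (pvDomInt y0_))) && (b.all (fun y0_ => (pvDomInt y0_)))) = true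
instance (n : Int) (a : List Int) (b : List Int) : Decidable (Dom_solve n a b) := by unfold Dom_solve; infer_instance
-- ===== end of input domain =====

-- B replaces A's per-prefix Counter rebuild and per-value countdown scan by one shared
-- incremental counter: grow the feasible prefix once, then walk it downward returning
-- elements until a position admits a smaller filler (objective: faster).

-- ===== PORT A =====
def mxA (f : PySem.Dict Int Int) : List Int :=
  (PySem.List.sorted f.keys (fun x => x) true).foldl
    (fun res k => res ++ List.replicate (f.getD k 0).toNat k) []

def prefA (b : List Int) (k : Int) (i : Int) (cur : List Int) (aa : PySem.Dict Int Int) :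
    Option (List Int × PySem.Dict Int Int) :=
  if _h : i < k then
    let bi := PySem.List.pyGetD b i 0
    if aa.getD bi 0 == 0 then none
    else prefA b k (i + 1) (cur ++ [bi]) (aa.modify bi 0 (· - 1))
  else some (cur, aa)
termination_by (k - i).toNat
decreasing_by omega

def findE (aa : PySem.Dict Int Int) (e : Int) : Option Int :=
  if _h : 0 ≤ e then
    if aa.getD e 0 > 0 then some e else findE aa (e - 1)
  else none
termination_by (e + 1).toNat
decreasing_by omega

def loopA (n : Int) (a b : List Int) (k : Int) (res : Option (List Int)) : Option (List Int) :=
  if _h : k < n + 1 then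
    match prefA b k 0 [] (PySem.Dict.counter a) with
    | none => res
    | some (cur, aa) =>
      if k < n then
        let cur2 :=
          match findE aa (PySem.List.pyGetD b k 0 - 1) with
          | some e => (cur ++ [e]) ++ mxA (aa.modify e 0 (· - 1))
          | none => cur
        if PySem.List.len cur2 < n then loopA n a b (k + 1) res
        else loopA n a b (k + 1) (some cur2)
      else loopA n a b (k + 1) (some cur)
  else res
termination_by (n + 1 - k).toNat
decreasing_by all_goals omega

def solve (n : Int) (a : List Int) (b : List Int) : Option (List Int) :=
  loopA n a b 0 none

-- ===== PORT B =====
def whileK (n : Int) (b : List Int) (cnt : PySem.Dict Int Int) (K : Int) :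
    PySem.Dict Int Int × Int :=
  if _h : K < n ∧ cnt.getD (PySem.List.pyGetD b K 0) 0 > 0 then
    whileK n b (cnt.modify (PySem.List.pyGetD b K 0) 0 (· - 1)) (K + 1)
  else (cnt, K)
termination_by (n - K).toNat
decreasing_by omega

def elemsB (cnt : PySem.Dict Int Int) : List Int :=
  cnt.items.foldl (fun acc p => acc ++ List.replicate p.2.toNat p.1) []

def scanB (b : List Int) (cnt : PySem.Dict Int Int) (k : Int) : Option (List Int) :=
  let bk := PySem.List.pyGetD b k 0
  let cands := cnt.keys.filter (fun v => decide (cnt.getD v 0 > 0) && decide (0 ≤ v) && decide (v < bk))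
  match PySem.List.max? cands (fun x => x) with
  | some e =>
      some (PySem.List.slice b none (some k) ++ [e] ++
        PySem.List.sorted (elemsB (cnt.modify e 0 (· - 1))) (fun x => x) true)
  | none =>
      if _hk : 0 < k then
        scanB b (cnt.modify (PySem.List.pyGetD b (k - 1) 0) 0 (· + 1)) (k - 1)
      else none
termination_by k.toNat
decreasing_by omega

def solve_alt (n : Int) (a : List Int) (b : List Int) : Option (List Int) :=
  if n < 0 then none
  else
    let p := whileK n b (PySem.Dict.counter a) 0
    if p.2 == n then some (PySem.List.slice b none (some n))
    else if PySem.List.len a < n then none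
    else scanB b p.1 p.2

-- ===== PRECONDITION & SPEC =====
-- Pre_ excludes exactly the inputs where A raises IndexError: len(b) < n while the whole
-- multiset b is drawable from a, so A's prefix loop never fails and b[k] overruns at k = len(b).
def Pre_solve (n : Int) (a : List Int) (b : List Int) : Prop :=
  ¬ (((b.length : Int) < n) ∧ ∀ x ∈ b, b.count x ≤ a.count x)
instance (n : Int) (a : List Int) (b : List Int) : Decidable (Pre_solve n a b) := by
  unfold Pre_solve; infer_instance

def pvWitness_solve : Int × List Int × List Int := (3, [1, 0, 2], [2, 1, 0])

def Spec_solve (n : Int) (a : List Int) (b : List Int) (out : Option (List Int)) : Prop :=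
  out = solve_alt n a b
instance (n : Int) (a : List Int) (b : List Int) (out : Option (List Int)) :
    Decidable (Spec_solve n a b out) := by unfold Spec_solve; infer_instance

-- ===== CLAIM (what is proved, stated in full; the proofs are below) =====
def Claim_equal_solve : Prop := ∀ (n : Int) (a : List Int) (b : List Int),
  Dom_solve n a b → Pre_solve n a b → Spec_solve n a b (solve n a b)

-- ===== LEMMAS AND PROOFS =====

-- proof-only abbreviations
abbrev SubPre (a b : List Int) (k : Nat) : Prop := ∀ x ∈ b.take k, (b.take k).count x ≤ a.count x

def DD (a b : List Int) (k : Nat) : PySem.Dict Int Int :=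
  (b.take k).foldl (fun d x => d.modify x 0 (· - 1)) (PySem.Dict.counter a)

def KKf (n : Int) (a b : List Int) : Nat := Nat.findGreatest (fun k => SubPre a b k) n.toNat

def candB (a b : List Int) (k : Nat) (e : Int) : Bool :=
  decide (0 ≤ e) && decide (e < b.getD k 0) && decide ((b.take k).count e < a.count e)

def tailD (a b : List Int) (k : Nat) (e : Int) : List Int :=
  PySem.List.sorted (a.diff (b.take k ++ [e])) (fun x => x) true

def bestD (a b : List Int) : Nat → Option (List Int)
  | 0 =>
    match PySem.List.max? (a.filter (candB a b 0)) (fun x => x) with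
    | some e => some (b.take 0 ++ [e] ++ tailD a b 0 e)
    | none => none
  | (j+1) =>
    match PySem.List.max? (a.filter (candB a b (j+1))) (fun x => x) with
    | some e => some (b.take (j+1) ++ [e] ++ tailD a b (j+1) e)
    | none => bestD a b j

-- basic dict facts
lemma getD_foldl_modify_sub (l : List Int) (d : PySem.Dict Int Int) (v : Int) :
    (l.foldl (fun d x => d.modify x 0 (· - 1)) d).getD v 0 = d.getD v 0 - l.count v := by
  induction l generalizing d with
  | nil => simp
  | cons x t ih =>
    simp only [List.foldl_cons, ih, PySem.Dict.getD_modify, List.count_cons]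
    by_cases hx : v = x
    · simp [hx]; ring
    · simp [hx]; omega

lemma nodup_keys_modify (d : PySem.Dict Int Int) (x : Int) (f : Int → Int)
    (h : d.keys.Nodup) : (d.modify x 0 f).keys.Nodup := by
  have := PySem.Dict.nodup_keys_insert d x (f (d.getD x 0)) h
  simpa [PySem.Dict.modify] using this

lemma mem_keys_of_getD_ne (d : PySem.Dict Int Int) (v : Int) (h : d.getD v 0 ≠ 0) :
    v ∈ d.keys := by
  by_contra hm
  have hc : d.contains v = false := by
    by_contra hcc
    exact hm ((PySem.Dict.contains_iff_mem_keys d v).mp (by simpa using hcc))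
  have hn := (PySem.Dict.get?_eq_none_iff_contains d v).mpr hc
  rw [PySem.Dict.getD_eq_get?_getD, hn] at h
  simp at h

lemma getD_DD (a b : List Int) (k : Nat) (v : Int) :
    (DD a b k).getD v 0 = (a.count v : Int) - ((b.take k).count v : Int) := by
  unfold DD
  rw [getD_foldl_modify_sub, PySem.Dict.getD_counter]

lemma nodup_keys_foldl_modify (l : List Int) (d : PySem.Dict Int Int)
    (h : d.keys.Nodup) : (l.foldl (fun d x => d.modify x 0 (· - 1)) d).keys.Nodup := by
  induction l generalizing d with
  | nil => simpa
  | cons x t ih => exact ih _ (nodup_keys_modify d x _ h)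

lemma nodup_keys_DD (a b : List Int) (k : Nat) : (DD a b k).keys.Nodup := by
  exact nodup_keys_foldl_modify _ _ (PySem.Dict.nodup_keys_counter a)

-- counting facts
lemma count_take_succ (b : List Int) (i : Nat) (hi : i < b.length) (x : Int) :
    (b.take (i+1)).count x = (b.take i).count x + if b[i] = x then 1 else 0 := by
  rw [List.take_add_one]
  simp only [List.getElem?_eq_getElem hi, Option.toList_some, List.count_append]
  by_cases h : b[i] = x
  · simp [h]
  · simp [h]

lemma count_take_le (b : List Int) (i k : Nat) (h : i ≤ k) (x : Int) :
    (b.take i).count x ≤ (b.take k).count x := by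
  have hs : (b.take i).Sublist (b.take k) := by
    have := List.take_sublist i (b.take k)
    rwa [List.take_take, Nat.min_eq_left h] at this
  exact hs.count_le x

lemma mem_take_of_take (b : List Int) (i k : Nat) (h : i ≤ k) (x : Int)
    (hx : x ∈ b.take i) : x ∈ b.take k := by
  have hs : (b.take i).Sublist (b.take k) := by
    have := List.take_sublist i (b.take k)
    rwa [List.take_take, Nat.min_eq_left h] at this
  exact hs.mem hx

lemma subpre_mono (a b : List Int) (i k : Nat) (h : i ≤ k) (hS : SubPre a b k) :
    SubPre a b i := by
  intro x hx
  exact le_trans (count_take_le b i k h x) (hS x (mem_take_of_take b i k h x hx))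

lemma subpre_of_ge_length (a b : List Int) (i k : Nat) (hS : SubPre a b i)
    (hlen : b.length ≤ i) : SubPre a b k := by
  have hb : b.take i = b := List.take_of_length_le hlen
  intro x hx
  have hxb : x ∈ b := (List.take_sublist k b).mem hx
  calc (b.take k).count x ≤ b.count x := (List.take_sublist k b).count_le x
    _ ≤ a.count x := by have := hS x (by rwa [hb]); rwa [hb] at this

lemma subpre_pool_nonneg (a b : List Int) (i : Nat) (hS : SubPre a b i) (x : Int) :
    ((b.take i).count x : Int) ≤ (a.count x : Int) := by
  by_cases hx : x ∈ b.take i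
  · exact_mod_cast hS x hx
  · simp [List.count_eq_zero_of_not_mem hx]

lemma subpre_succ_iff (a b : List Int) (i : Nat) (hS : SubPre a b i) (hib : i < b.length) :
    SubPre a b (i+1) ↔ ((b.take i).count b[i] : Int) < (a.count b[i] : Int) := by
  constructor
  · intro h
    have hmem : b[i] ∈ b.take (i+1) := by
      have hlen : i < (b.take (i+1)).length := by simp [hib]
      have := List.getElem_mem hlen
      rwa [List.getElem_take] at this
    have := h _ hmem
    rw [count_take_succ b i hib] at this
    simp at this
    exact_mod_cast this
  · intro h x hx
    rw [count_take_succ b i hib]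
    by_cases hbx : b[i] = x
    · subst hbx
      simp
      exact_mod_cast h
    · simp [hbx]
      by_cases hxi : x ∈ b.take i
      · exact hS x hxi
      · simp [List.count_eq_zero_of_not_mem hxi]

-- prefA characterization
lemma DD_succ (a b : List Int) (i : Nat) (hib : i < b.length) :
    DD a b (i+1) = (DD a b i).modify b[i] 0 (· - 1) := by
  unfold DD
  rw [List.take_add_one, List.getElem?_eq_getElem hib]
  simp only [Option.toList_some, List.foldl_append, List.foldl_cons, List.foldl_nil]

lemma take_succ_append (b : List Int) (i : Nat) (hib : i < b.length) :
    b.take i ++ [b[i]] = b.take (i+1) := by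
  rw [List.take_add_one, List.getElem?_eq_getElem hib]
  simp

lemma prefA_eq (a b : List Int) (k : Nat) (hkb : k ≤ b.length) (hS : SubPre a b k) :
    ∀ (i : Nat), i ≤ k →
      prefA b k i (b.take i) (DD a b i) = some (b.take k, DD a b k) := by
  have main : ∀ (fuel : Nat) (i : Nat), k - i = fuel → i ≤ k →
      prefA b k i (b.take i) (DD a b i) = some (b.take k, DD a b k) := by
    intro fuel
    induction fuel with
    | zero =>
      intro i hf hik
      have hik' : i = k := by omega
      subst hik'
      rw [prefA, dif_neg (by omega)]
    | succ f ih =>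
      intro i hf hik
      have hik' : i < k := by omega
      have hib : i < b.length := by omega
      rw [prefA, dif_pos (by exact_mod_cast hik')]
      have hbi : PySem.List.pyGetD b (i : Int) 0 = b[i] := by
        rw [PySem.List.pyGetD_natCast]
        exact List.getD_eq_getElem b 0 hib
      have hSi1 : SubPre a b (i+1) := subpre_mono a b (i+1) k (by omega) hS
      have hSi : SubPre a b i := subpre_mono a b i k (by omega) hS
      have hpos : ((b.take i).count b[i] : Int) < (a.count b[i] : Int) :=
        (subpre_succ_iff a b i hSi hib).mp hSi1
      have hne : (DD a b i).getD b[i] 0 ≠ 0 := by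
        rw [getD_DD]; omega
      rw [hbi]
      simp only [beq_iff_eq, hne, if_false]
      rw [take_succ_append b i hib, ← DD_succ a b i hib]
      exact ih (i+1) (by omega) (by omega)
  intro i hik
  exact main (k - i) i rfl hik

lemma prefA_fail (a b : List Int) (k : Nat) (hnS : ¬ SubPre a b k) :
    ∀ (i : Nat), i ≤ k → SubPre a b i →
      prefA b k i (b.take i) (DD a b i) = none := by
  have main : ∀ (fuel : Nat) (i : Nat), k - i = fuel → i ≤ k → SubPre a b i →
      prefA b k i (b.take i) (DD a b i) = none := by
    intro fuel
    induction fuel with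
    | zero =>
      intro i hf hik hSi
      have : i = k := by omega
      subst this
      exact absurd hSi hnS
    | succ f ih =>
      intro i hf hik hSi
      have hik' : i < k := by omega
      have hib : i < b.length := by
        by_contra hge
        exact hnS (subpre_of_ge_length a b i k hSi (by omega))
      rw [prefA, dif_pos (by exact_mod_cast hik')]
      have hbi : PySem.List.pyGetD b (i : Int) 0 = b[i] := by
        rw [PySem.List.pyGetD_natCast]
        exact List.getD_eq_getElem b 0 hib
      rw [hbi]
      by_cases hS1 : SubPre a b (i+1)
      · have hpos : ((b.take i).count b[i] : Int) < (a.count b[i] : Int) :=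
          (subpre_succ_iff a b i hSi hib).mp hS1
        have hne : (DD a b i).getD b[i] 0 ≠ 0 := by
          rw [getD_DD]; omega
        simp only [beq_iff_eq, hne, if_false]
        rw [take_succ_append b i hib, ← DD_succ a b i hib]
        exact ih (i+1) (by omega) (by omega) hS1
      · have hle : ¬ ((b.take i).count b[i] : Int) < (a.count b[i] : Int) := by
          intro hlt
          exact hS1 ((subpre_succ_iff a b i hSi hib).mpr hlt)
        have hge : ((b.take i).count b[i] : Int) ≤ (a.count b[i] : Int) :=
          subpre_pool_nonneg a b i hSi b[i]
        have hz : (DD a b i).getD b[i] 0 = 0 := by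
          rw [getD_DD]; omega
        simp [hz]
  intro i hik hSi
  exact main (k - i) i rfl hik hSi

-- findE characterization
lemma findE_none_iff (d : PySem.Dict Int Int) (s : Int) :
    findE d s = none ↔ ∀ y : Int, 0 ≤ y → y ≤ s → ¬ (0 < d.getD y 0) := by
  induction s using findE.induct d with
  | case1 s0 h0 hpos =>
    rw [findE, dif_pos h0, if_pos hpos]
    simp only [reduceCtorEq, false_iff]
    intro hall
    exact hall s0 h0 le_rfl hpos
  | case2 s0 h0 hpos ih =>
    rw [findE, dif_pos h0, if_neg hpos]
    rw [ih]
    constructor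
    · intro hall y hy0 hys
      rcases lt_or_eq_of_le hys with hlt | heq
      · exact hall y hy0 (by omega)
      · subst heq; exact hpos
    · intro hall y hy0 hys
      exact hall y hy0 (by omega)
  | case3 s0 h0 =>
    rw [findE, dif_neg h0]
    simp only [true_iff]
    intro y hy0 hys
    omega

lemma findE_some_iff (d : PySem.Dict Int Int) (s e : Int) :
    findE d s = some e ↔
      (0 ≤ e ∧ e ≤ s ∧ 0 < d.getD e 0 ∧ ∀ y : Int, e < y → y ≤ s → ¬ (0 < d.getD y 0)) := by
  induction s using findE.induct d with
  | case1 s0 h0 hpos =>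
    rw [findE, dif_pos h0, if_pos hpos]
    constructor
    · rintro h'; cases h'; exact ⟨h0, le_rfl, hpos, fun y hy hys _ => by omega⟩
    · rintro ⟨he0, hes, hepos, hmax⟩
      rcases lt_or_eq_of_le hes with hlt | heq
      · exact absurd hpos (hmax s0 hlt le_rfl)
      · simp [heq]
  | case2 s0 h0 hpos ih =>
    rw [findE, dif_pos h0, if_neg hpos]
    rw [ih]
    constructor
    · rintro ⟨he0, hes, hepos, hmax⟩
      refine ⟨he0, by omega, hepos, fun y hy hys => ?_⟩
      rcases lt_or_eq_of_le hys with hlt | heq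
      · exact hmax y hy (by omega)
      · subst heq; exact hpos
    · rintro ⟨he0, hes, hepos, hmax⟩
      have hes' : e ≤ s0 - 1 := by
        rcases lt_or_eq_of_le hes with hlt | heq
        · omega
        · subst heq; exact absurd hepos hpos
      exact ⟨he0, hes', hepos, fun y hy hys => hmax y hy (by omega)⟩
  | case3 s0 h0 =>
    rw [findE, dif_neg h0]
    simp only [reduceCtorEq, false_iff]
    rintro ⟨he0, hes, _, _⟩
    omega

-- max? congruence
lemma max?_congr_mem (xs ys : List Int) (h : ∀ v : Int, v ∈ xs ↔ v ∈ ys) :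
    PySem.List.max? xs (fun x => x) = PySem.List.max? ys (fun x => x) := by
  cases hx : PySem.List.max? xs (fun x => x) with
  | none =>
    have hxe : xs = [] := (PySem.List.max?_eq_none_iff xs _).mp hx
    subst hxe
    have : ys = [] := by
      cases ys with
      | nil => rfl
      | cons y t => exact absurd ((h y).mpr (by simp)) (by simp)
    rw [this]
    exact ((PySem.List.max?_eq_none_iff _ _).mpr rfl).symm
  | some m =>
    have hmem : m ∈ ys := (h m).mp (PySem.List.max?_mem hx)
    have hmax := PySem.List.max?_isMax hx
    cases hy : PySem.List.max? ys (fun x => x) with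
    | none =>
      rw [(PySem.List.max?_eq_none_iff ys _).mp hy] at hmem
      simp at hmem
    | some m' =>
      have hmem' : m' ∈ xs := (h m').mpr (PySem.List.max?_mem hy)
      have hmax' := PySem.List.max?_isMax hy
      have h1 : m' ≤ m := hmax m' hmem'
      have h2 : m ≤ m' := hmax' m hmem
      rw [le_antisymm h1 h2]

-- elements / descending-sort canonicalization
lemma count_flatMap_replicate (l : List Int) (g : Int → Int) (hnd : l.Nodup) (x : Int) :
    (l.flatMap (fun k => List.replicate (g k).toNat k)).count x
      = if x ∈ l then (g x).toNat else 0 := by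
  induction l with
  | nil => simp
  | cons k t ih =>
    simp only [List.flatMap_cons, List.count_append, List.count_replicate]
    rcases List.nodup_cons.mp hnd with ⟨hk, hnd'⟩
    rw [ih hnd']
    by_cases hxk : x = k
    · subst hxk
      simp [hk]
    · simp [hxk, Ne.symm hxk]

lemma flatMap_keys_of_elemsB (d : PySem.Dict Int Int) (hnd : d.keys.Nodup) :
    elemsB d = d.keys.flatMap (fun k => List.replicate (d.getD k 0).toNat k) := by
  unfold elemsB
  rw [PySem.Dict.items_eq_map_keys d hnd 0, PySem.List.foldl_append_eq_flatMap, List.flatMap_map]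
  simp

lemma count_elemsB (d : PySem.Dict Int Int) (hnd : d.keys.Nodup) (x : Int) :
    (elemsB d).count x = (d.getD x 0).toNat := by
  rw [flatMap_keys_of_elemsB d hnd, count_flatMap_replicate _ _ hnd]
  by_cases hm : x ∈ d.keys
  · simp [hm]
  · have : d.getD x 0 = 0 := by
      by_contra hne
      exact hm (mem_keys_of_getD_ne d x hne)
    simp [hm, this]

lemma sortedRev_congr_perm (X Y : List Int) (h : X.Perm Y) :
    PySem.List.sorted X (fun x => x) true = PySem.List.sorted Y (fun x => x) true := by
  haveI : Std.Antisymm (fun a b : Int => b ≤ a) := ⟨fun _ _ h1 h2 => le_antisymm h2 h1⟩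
  refine List.Perm.eq_of_pairwise' (r := fun a b : Int => b ≤ a) ?_ ?_ ?_
  · simpa using PySem.List.sorted_pairwise_rev X (fun x => x)
  · simpa using PySem.List.sorted_pairwise_rev Y (fun x => x)
  · exact ((PySem.List.sorted_perm X _ true).trans h).trans (PySem.List.sorted_perm Y _ true).symm

lemma mxA_eq (d : PySem.Dict Int Int) (hnd : d.keys.Nodup) :
    mxA d = PySem.List.sorted (elemsB d) (fun x => x) true := by
  haveI : Std.Antisymm (fun a b : Int => b ≤ a) := ⟨fun _ _ h1 h2 => le_antisymm h2 h1⟩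
  have hmx : mxA d = (PySem.List.sorted d.keys (fun x => x) true).flatMap
      (fun k => List.replicate (d.getD k 0).toNat k) := by
    unfold mxA
    rw [PySem.List.foldl_append_eq_flatMap]
    simp
  refine (List.Perm.eq_of_pairwise' (r := fun a b : Int => b ≤ a) ?_ ?_ ?_).symm
  · simpa using PySem.List.sorted_pairwise_rev (elemsB d) (fun x => x)
  · rw [hmx, List.pairwise_flatMap]
    constructor
    · intro a _
      exact List.pairwise_replicate.mpr (Or.inr le_rfl)
    · refine (PySem.List.sorted_pairwise_rev d.keys (fun x => x)).imp ?_
      intro k1 k2 hle x hx y hy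
      rw [List.eq_of_mem_replicate hx, List.eq_of_mem_replicate hy]
      exact hle
  · rw [hmx, flatMap_keys_of_elemsB d hnd]
    exact (PySem.List.sorted_perm _ _ true).trans
      (List.Perm.flatMap_right _ (PySem.List.sorted_perm d.keys _ true)).symm

lemma count_single_ite (x e : Int) : List.count x [e] = if x = e then 1 else 0 := by
  by_cases hxe : x = e
  · subst hxe; simp
  · simp only [List.count_singleton, beq_iff_eq]
    rw [if_neg (fun h => hxe h.symm), if_neg hxe]

lemma perm_elems_diff (a b : List Int) (k : Nat) (e : Int) (hS : SubPre a b k)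
    (hc : (b.take k).count e < a.count e)
    (d : PySem.Dict Int Int) (hnd : d.keys.Nodup)
    (hg : ∀ x, d.getD x 0 = (a.count x : Int) - ((b.take k).count x : Int) - (if x = e then 1 else 0)) :
    (elemsB d).Perm (a.diff (b.take k ++ [e])) := by
  rw [List.perm_iff_count]
  intro x
  rw [count_elemsB d hnd, List.count_diff, hg, List.count_append, count_single_ite]
  have hnn := subpre_pool_nonneg a b k hS x
  by_cases hxe : x = e
  · subst hxe; simp; omega
  · simp only [if_neg hxe]; omega

lemma subperm_take_cons (a b : List Int) (k : Nat) (e : Int) (hS : SubPre a b k)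
    (hc : (b.take k).count e < a.count e) : (b.take k ++ [e]).Subperm a := by
  rw [List.subperm_ext_iff]
  intro x hx
  rw [List.count_append, count_single_ite]
  have hnn := subpre_pool_nonneg a b k hS x
  by_cases hxe : x = e
  · subst hxe; simp; omega
  · simp only [if_neg hxe]; omega

lemma length_tailD (a b : List Int) (k : Nat) (e : Int) (_hk : k ≤ b.length) (hS : SubPre a b k)
    (hc : (b.take k).count e < a.count e) :
    (b.take k ++ [e] ++ tailD a b k e).length = a.length := by
  have hsub := subperm_take_cons a b k e hS hc
  have hperm := List.subperm_append_diff_self_of_count_le (List.subperm_ext_iff.mp hsub)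
  have hlen := hperm.length_eq
  unfold tailD
  simp only [List.length_append, PySem.List.length_sorted] at hlen ⊢
  omega

-- KK facts
lemma subpre_KK (n : Int) (a b : List Int) : SubPre a b (KKf n a b) := by
  exact Nat.findGreatest_spec (Nat.zero_le _) (fun x hx => by simp at hx)

lemma KK_le (n : Int) (a b : List Int) : KKf n a b ≤ n.toNat := Nat.findGreatest_le _

lemma le_KK (n : Int) (a b : List Int) (j : Nat) (hj : j ≤ n.toNat) (hS : SubPre a b j) :
    j ≤ KKf n a b := Nat.le_findGreatest hj hS

lemma KK_lt_length (n : Int) (a b : List Int) (hpre : Pre_solve n a b)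
    (hlt : KKf n a b < n.toNat) : KKf n a b < b.length := by
  by_contra hge
  apply hpre
  have htake : b.take (KKf n a b) = b := List.take_of_length_le (by omega)
  have hS := subpre_KK n a b
  unfold SubPre at hS
  rw [htake] at hS
  refine ⟨?_, hS⟩
  have h1 : b.length ≤ KKf n a b := by omega
  have h2 : (KKf n a b : Int) < n := by
    have := KK_le n a b
    omega
  omega

lemma not_subpre_KK_succ (n : Int) (a b : List Int) (hlt : KKf n a b < n.toNat) :
    ¬ SubPre a b (KKf n a b + 1) := by
  intro hS
  have := le_KK n a b (KKf n a b + 1) (by omega) hS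
  omega

-- whileK characterization
lemma whileK_eq (n : Int) (a b : List Int) (hn : 0 ≤ n) (hpre : Pre_solve n a b) :
    ∀ (K : Nat), K ≤ KKf n a b → SubPre a b K →
      whileK n b (DD a b K) (K : Int) = (DD a b (KKf n a b), ((KKf n a b : Nat) : Int)) := by
  have hm : ((n.toNat : Int)) = n := Int.toNat_of_nonneg hn
  have main : ∀ (fuel : Nat) (K : Nat), KKf n a b - K = fuel → K ≤ KKf n a b → SubPre a b K →
      whileK n b (DD a b K) (K : Int) = (DD a b (KKf n a b), ((KKf n a b : Nat) : Int)) := by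
    intro fuel
    induction fuel with
    | zero =>
      intro K hf hK hS
      have hKK : K = KKf n a b := by omega
      have hguard : ¬ ((K : Int) < n ∧ (DD a b K).getD (PySem.List.pyGetD b (K : Int) 0) 0 > 0) := by
        rintro ⟨hKn, hpos⟩
        have hKm : K < n.toNat := by omega
        have hKb : K < b.length := by rw [hKK]; exact KK_lt_length n a b hpre (by omega)
        have hbi : PySem.List.pyGetD b (K : Int) 0 = b[K] := by
          rw [PySem.List.pyGetD_natCast]
          exact List.getD_eq_getElem b 0 hKb
        rw [hbi, getD_DD] at hpos
        have hns : ¬ SubPre a b (K + 1) := by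
          rw [hKK]; exact not_subpre_KK_succ n a b (by omega)
        have := (subpre_succ_iff a b K hS hKb).not.mp hns
        omega
      rw [whileK, dif_neg hguard, hKK]
    | succ f ih =>
      intro K hf hK hS
      have hKlt : K < KKf n a b := by omega
      have hKm : K < n.toNat := by
        have := KK_le n a b
        omega
      have hKb : K < b.length := by
        by_contra hge
        apply hpre
        have htake : b.take K = b := List.take_of_length_le (by omega)
        have hS' := hS
        unfold SubPre at hS'
        rw [htake] at hS'
        exact ⟨by omega, hS'⟩
      have hbi : PySem.List.pyGetD b (K : Int) 0 = b[K] := by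
        rw [PySem.List.pyGetD_natCast]
        exact List.getD_eq_getElem b 0 hKb
      have hS1 : SubPre a b (K+1) :=
        subpre_mono a b (K+1) (KKf n a b) (by omega) (subpre_KK n a b)
      have hpos := (subpre_succ_iff a b K hS hKb).mp hS1
      rw [whileK, dif_pos]
      · rw [hbi, ← DD_succ a b K hKb]
        have hcast : ((K : Int) + 1) = ((K + 1 : Nat) : Int) := by push_cast; ring
        rw [hcast]
        exact ih (K+1) (by omega) (by omega) hS1
      · constructor
        · omega
        · rw [hbi, getD_DD]; omega
  intro K hK hS
  exact main (KKf n a b - K) K rfl hK hS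

lemma slice_take (b : List Int) (k : Nat) :
    PySem.List.slice b none (some (k : Int)) = b.take k := PySem.List.slice_to_natCast b k

lemma bestD_some (a b : List Int) (k : Nat) (e : Int)
    (hmax : PySem.List.max? (a.filter (candB a b k)) (fun x => x) = some e) :
    bestD a b k = some (b.take k ++ [e] ++ tailD a b k e) := by
  cases k <;> simp [bestD, hmax]

lemma bestD_none_succ (a b : List Int) (j : Nat)
    (hmax : PySem.List.max? (a.filter (candB a b (j+1))) (fun x => x) = none) :
    bestD a b (j+1) = bestD a b j := by
  simp [bestD, hmax]

lemma bestD_none_zero (a b : List Int)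
    (hmax : PySem.List.max? (a.filter (candB a b 0)) (fun x => x) = none) :
    bestD a b 0 = none := by
  simp [bestD, hmax]

lemma cand_of_max (a b : List Int) (k : Nat) (e : Int)
    (hmax : PySem.List.max? (a.filter (candB a b k)) (fun x => x) = some e) :
    0 ≤ e ∧ e < b.getD k 0 ∧ (b.take k).count e < a.count e := by
  have hmem := PySem.List.max?_mem hmax
  rcases List.mem_filter.mp hmem with ⟨_, hcb⟩
  unfold candB at hcb
  simp only [Bool.and_eq_true, decide_eq_true_eq] at hcb
  exact ⟨hcb.1.1, hcb.1.2, hcb.2⟩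

lemma max?_filter_cands (n : Int) (a b : List Int) (hpre : Pre_solve n a b)
    (hKm : KKf n a b < n.toNat) (k : Nat) (cnt : PySem.Dict Int Int)
    (hk : k ≤ KKf n a b)
    (hg : ∀ x, cnt.getD x 0 = (a.count x : Int) - ((b.take k).count x : Int))
    (_hnd : cnt.keys.Nodup) :
    PySem.List.max? (cnt.keys.filter (fun v => decide (cnt.getD v 0 > 0) && decide (0 ≤ v) &&
        decide (v < PySem.List.pyGetD b (k : Int) 0))) (fun x => x)
      = PySem.List.max? (a.filter (candB a b k)) (fun x => x) := by
  have hkb : k < b.length := by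
    have := KK_lt_length n a b hpre hKm
    omega
  have hbk : PySem.List.pyGetD b (k : Int) 0 = b.getD k 0 := PySem.List.pyGetD_natCast b k 0
  apply max?_congr_mem
  intro v
  rw [List.mem_filter, List.mem_filter]
  unfold candB
  simp only [Bool.and_eq_true, decide_eq_true_eq, hbk]
  constructor
  · rintro ⟨hvk, ⟨hpos, hv0⟩, hvbk⟩
    rw [hg] at hpos
    have hcnt : (b.take k).count v < a.count v := by omega
    have hva : v ∈ a := by
      rw [← List.count_pos_iff]
      omega
    exact ⟨hva, ⟨hv0, hvbk⟩, hcnt⟩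
  · rintro ⟨hva, ⟨hv0, hvbk⟩, hcnt⟩
    have hpos : 0 < cnt.getD v 0 := by rw [hg]; omega
    have hvk : v ∈ cnt.keys := mem_keys_of_getD_ne cnt v (by omega)
    exact ⟨hvk, ⟨hpos, hv0⟩, hvbk⟩

lemma tail_modify_eq (n : Int) (a b : List Int) (_hpre : Pre_solve n a b)
    (_hKm : KKf n a b < n.toNat) (k : Nat) (cnt : PySem.Dict Int Int)
    (hk : k ≤ KKf n a b)
    (hg : ∀ x, cnt.getD x 0 = (a.count x : Int) - ((b.take k).count x : Int))
    (hnd : cnt.keys.Nodup) (e : Int) (hec : (b.take k).count e < a.count e) :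
    PySem.List.sorted (elemsB (cnt.modify e 0 (· - 1))) (fun x => x) true = tailD a b k e := by
  have hS : SubPre a b k := subpre_mono a b k (KKf n a b) hk (subpre_KK n a b)
  have hnd' : (cnt.modify e 0 (· - 1)).keys.Nodup := nodup_keys_modify cnt e _ hnd
  have hg' : ∀ x, (cnt.modify e 0 (· - 1)).getD x 0
      = (a.count x : Int) - ((b.take k).count x : Int) - (if x = e then 1 else 0) := by
    intro x
    rw [PySem.Dict.getD_modify]
    by_cases hxe : x = e
    · subst hxe; rw [if_pos rfl, if_pos rfl, hg]
    · rw [if_neg hxe, if_neg hxe, hg]; ring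
  unfold tailD
  exact sortedRev_congr_perm _ _ (perm_elems_diff a b k e hS hec _ hnd' hg')

-- scanB characterization
lemma scanB_eq (n : Int) (a b : List Int) (_hn : 0 ≤ n) (hpre : Pre_solve n a b)
    (hKm : KKf n a b < n.toNat) :
    ∀ (k : Nat) (cnt : PySem.Dict Int Int), k ≤ KKf n a b →
      (∀ x, cnt.getD x 0 = (a.count x : Int) - ((b.take k).count x : Int)) →
      cnt.keys.Nodup →
      scanB b cnt (k : Int) = bestD a b k := by
  intro k
  induction k with
  | zero =>
    intro cnt hk hg hnd
    have hkb : 0 < b.length := lt_of_le_of_lt (Nat.zero_le _) (KK_lt_length n a b hpre hKm)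
    have hS : SubPre a b 0 := fun x hx => by simp at hx
    rw [scanB, max?_filter_cands n a b hpre hKm 0 cnt hk hg hnd]
    cases hmax : PySem.List.max? (a.filter (candB a b 0)) (fun x => x) with
    | some e =>
      simp only
      rw [bestD_some a b 0 e hmax, slice_take]
      rcases cand_of_max a b 0 e hmax with ⟨he0, hebk, hec⟩
      rw [tail_modify_eq n a b hpre hKm 0 cnt hk hg hnd e hec]
    | none =>
      simp only
      rw [dif_neg (by omega)]
      simp [bestD, hmax]
  | succ j ih =>
    intro cnt hk hg hnd
    have hkb : j + 1 ≤ b.length := by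
      have := KK_lt_length n a b hpre hKm
      omega
    have hS : SubPre a b (j+1) := subpre_mono a b (j+1) (KKf n a b) hk (subpre_KK n a b)
    rw [scanB, max?_filter_cands n a b hpre hKm (j+1) cnt hk hg hnd]
    cases hmax : PySem.List.max? (a.filter (candB a b (j+1))) (fun x => x) with
    | some e =>
      simp only
      rw [bestD_some a b (j+1) e hmax, slice_take]
      rcases cand_of_max a b (j+1) e hmax with ⟨he0, hebk, hec⟩
      rw [tail_modify_eq n a b hpre hKm (j+1) cnt hk hg hnd e hec]
    | none =>
      simp only
      rw [dif_pos (by push_cast; omega)]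
      have hjb : j < b.length := by omega
      have hbj : PySem.List.pyGetD b ((j+1 : Nat) - 1 : Int) 0 = b[j] := by
        have : ((j+1 : Nat) : Int) - 1 = (j : Int) := by push_cast; ring
        rw [this, PySem.List.pyGetD_natCast]
        exact List.getD_eq_getElem b 0 hjb
      have hcast : (((j+1 : Nat) : Int) - 1) = ((j : Nat) : Int) := by push_cast; ring
      rw [hbj, hcast]
      have hg' : ∀ x, (cnt.modify b[j] 0 (· + 1)).getD x 0
          = (a.count x : Int) - ((b.take j).count x : Int) := by
        intro x
        rw [PySem.Dict.getD_modify]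
        by_cases hxb : x = b[j]
        · rw [if_pos hxb, hg, hxb, count_take_succ b j hjb]
          simp
          omega
        · rw [if_neg hxb, hg, count_take_succ b j hjb]
          have hbx : ¬ b[j] = x := fun h => hxb h.symm
          simp [hbx]
      rw [ih (cnt.modify b[j] 0 (· + 1)) (by omega) hg' (nodup_keys_modify cnt b[j] _ hnd)]
      rw [bestD_none_succ a b j hmax]

lemma prefA0_eq (a b : List Int) (k : Nat) (hkb : k ≤ b.length) (hS : SubPre a b k) :
    prefA b (k : Int) 0 [] (PySem.Dict.counter a) = some (b.take k, DD a b k) := by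
  have h := prefA_eq a b k hkb hS 0 (Nat.zero_le k)
  simpa [DD] using h

lemma prefA0_fail (a b : List Int) (k : Nat) (hnS : ¬ SubPre a b k) :
    prefA b (k : Int) 0 [] (PySem.Dict.counter a) = none := by
  have h := prefA_fail a b k hnS 0 (Nat.zero_le k) (fun x hx => by simp at hx)
  simpa [DD] using h

lemma mxA_DD_eq (a b : List Int) (k : Nat) (e : Int) (hS : SubPre a b k)
    (hec : (b.take k).count e < a.count e) :
    mxA ((DD a b k).modify e 0 (· - 1)) = tailD a b k e := by
  have hnd' : ((DD a b k).modify e 0 (· - 1)).keys.Nodup :=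
    nodup_keys_modify _ e _ (nodup_keys_DD a b k)
  rw [mxA_eq _ hnd']
  have hg' : ∀ x, ((DD a b k).modify e 0 (· - 1)).getD x 0
      = (a.count x : Int) - ((b.take k).count x : Int) - (if x = e then 1 else 0) := by
    intro x
    rw [PySem.Dict.getD_modify]
    by_cases hxe : x = e
    · subst hxe; rw [if_pos rfl, if_pos rfl, getD_DD]
    · rw [if_neg hxe, if_neg hxe, getD_DD]; ring
  unfold tailD
  exact sortedRev_congr_perm _ _ (perm_elems_diff a b k e hS hec _ hnd' hg')

lemma findE_DD_eq_max? (a b : List Int) (k : Nat) (_hS : SubPre a b k) :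
    findE (DD a b k) (PySem.List.pyGetD b (k : Int) 0 - 1)
      = PySem.List.max? (a.filter (candB a b k)) (fun x => x) := by
  have hbk : PySem.List.pyGetD b (k : Int) 0 = b.getD k 0 := PySem.List.pyGetD_natCast b k 0
  rw [hbk]
  cases hmax : PySem.List.max? (a.filter (candB a b k)) (fun x => x) with
  | none =>
    have hemp : a.filter (candB a b k) = [] := (PySem.List.max?_eq_none_iff _ _).mp hmax
    rw [findE_none_iff]
    intro y hy0 hys hpos
    rw [getD_DD] at hpos
    have hyc : (b.take k).count y < a.count y := by omega
    have hya : y ∈ a := by rw [← List.count_pos_iff]; omega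
    have : y ∈ a.filter (candB a b k) := by
      rw [List.mem_filter]
      refine ⟨hya, ?_⟩
      unfold candB
      simp only [Bool.and_eq_true, decide_eq_true_eq]
      exact ⟨⟨hy0, by omega⟩, hyc⟩
    rw [hemp] at this
    simp at this
  | some e =>
    rcases cand_of_max a b k e hmax with ⟨he0, hebk, hec⟩
    rw [findE_some_iff]
    refine ⟨he0, by omega, ?_, ?_⟩
    · rw [getD_DD]; omega
    · intro y hy hys hpos
      rw [getD_DD] at hpos
      have hyc : (b.take k).count y < a.count y := by omega
      have hya : y ∈ a := by rw [← List.count_pos_iff]; omega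
      have hmem : y ∈ a.filter (candB a b k) := by
        rw [List.mem_filter]
        refine ⟨hya, ?_⟩
        unfold candB
        simp only [Bool.and_eq_true, decide_eq_true_eq]
        exact ⟨⟨by omega, by omega⟩, hyc⟩
      have := PySem.List.max?_isMax hmax y hmem
      simp at this
      omega

lemma len_cur2 (a b : List Int) (k : Nat) (e : Int) (hkb : k ≤ b.length) (hS : SubPre a b k)
    (hec : (b.take k).count e < a.count e) :
    ((b.take k ++ [e]) ++ mxA ((DD a b k).modify e 0 (· - 1))).length = a.length := by
  rw [mxA_DD_eq a b k e hS hec]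
  exact length_tailD a b k e hkb hS hec

-- loopA characterizations
lemma loopA_full (n : Int) (a b : List Int) (hn : 0 ≤ n) (hpre : Pre_solve n a b)
    (hKK : KKf n a b = n.toNat) :
    ∀ (k : Nat) (res : Option (List Int)), k ≤ n.toNat →
      loopA n a b (k : Int) res = some (b.take n.toNat) := by
  have hm : ((n.toNat : Int)) = n := Int.toNat_of_nonneg hn
  have hmb : n.toNat ≤ b.length := by
    by_contra hgt
    apply hpre
    have hS := subpre_KK n a b
    rw [hKK] at hS
    have htake : b.take n.toNat = b := List.take_of_length_le (by omega)
    unfold SubPre at hS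
    rw [htake] at hS
    exact ⟨by omega, hS⟩
  have main : ∀ (fuel : Nat) (k : Nat), n.toNat - k = fuel → k ≤ n.toNat →
      ∀ (res : Option (List Int)), loopA n a b (k : Int) res = some (b.take n.toNat) := by
    intro fuel
    induction fuel with
    | zero =>
      intro k hf hk res
      have hkm : k = n.toNat := by omega
      rw [loopA, dif_pos (by omega)]
      have hS : SubPre a b k := by rw [hkm, ← hKK]; exact subpre_KK n a b
      rw [prefA0_eq a b k (by omega) hS]
      simp only
      rw [if_neg (by omega)]
      rw [loopA, dif_neg (by omega)]
      rw [hkm]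
    | succ f ih =>
      intro k hf hk res
      have hklt : k < n.toNat := by omega
      rw [loopA, dif_pos (by omega)]
      have hS : SubPre a b k :=
        subpre_mono a b k (KKf n a b) (by omega) (subpre_KK n a b)
      rw [prefA0_eq a b k (by omega) hS]
      simp only
      rw [if_pos (by omega)]
      have hcast : ((k : Int) + 1) = ((k + 1 : Nat) : Int) := by push_cast; ring
      cases hfe : findE (DD a b k) (PySem.List.pyGetD b (k : Int) 0 - 1) with
      | none =>
        simp only
        rw [if_pos (by simp [PySem.List.len_eq]; omega), hcast]
        exact ih (k+1) (by omega) (by omega) res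
      | some e =>
        simp only
        split
        · rw [hcast]; exact ih (k+1) (by omega) (by omega) res
        · rw [hcast]; exact ih (k+1) (by omega) (by omega) _
  intro k res hk
  exact main (n.toNat - k) k rfl hk res

lemma loopA_small (n : Int) (a b : List Int) (hn : 0 ≤ n) (hpre : Pre_solve n a b)
    (hKm : KKf n a b < n.toNat) (halen : a.length < n.toNat) :
    ∀ (k : Nat) (res : Option (List Int)), k ≤ KKf n a b + 1 →
      loopA n a b (k : Int) res = res := by
  have hm : ((n.toNat : Int)) = n := Int.toNat_of_nonneg hn
  have hKb : KKf n a b < b.length := KK_lt_length n a b hpre hKm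
  have main : ∀ (fuel : Nat) (k : Nat), KKf n a b + 1 - k = fuel → k ≤ KKf n a b + 1 →
      ∀ (res : Option (List Int)), loopA n a b (k : Int) res = res := by
    intro fuel
    induction fuel with
    | zero =>
      intro k hf hk res
      have hkm : k = KKf n a b + 1 := by omega
      rw [loopA, dif_pos (by omega)]
      have hnS : ¬ SubPre a b k := by
        rw [hkm]; exact not_subpre_KK_succ n a b hKm
      rw [prefA0_fail a b k hnS]
    | succ f ih =>
      intro k hf hk res
      have hkK : k ≤ KKf n a b := by omega
      rw [loopA, dif_pos (by omega)]
      have hS : SubPre a b k := subpre_mono a b k (KKf n a b) hkK (subpre_KK n a b)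
      rw [prefA0_eq a b k (by omega) hS]
      simp only
      rw [if_pos (by omega)]
      have hcast : ((k : Int) + 1) = ((k + 1 : Nat) : Int) := by push_cast; ring
      cases hfe : findE (DD a b k) (PySem.List.pyGetD b (k : Int) 0 - 1) with
      | none =>
        simp only
        rw [if_pos (by simp [PySem.List.len_eq]; omega), hcast]
        exact ih (k+1) (by omega) (by omega) res
      | some e =>
        simp only
        rcases (findE_some_iff _ _ _).mp hfe with ⟨he0, hes, hepos, hemax⟩
        rw [getD_DD] at hepos
        have hec : (b.take k).count e < a.count e := by omega
        have hlen := len_cur2 a b k e (by omega) hS hec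
        rw [if_pos (by rw [PySem.List.len_eq, hlen]; omega), hcast]
        exact ih (k+1) (by omega) (by omega) res
  intro k res hk
  exact main (KKf n a b + 1 - k) k rfl hk res

lemma loopA_best (n : Int) (a b : List Int) (hn : 0 ≤ n) (hpre : Pre_solve n a b)
    (hKm : KKf n a b < n.toNat) (halen : n.toNat ≤ a.length) :
    ∀ (k : Nat) (res : Option (List Int)), k ≤ KKf n a b + 1 →
      (res = if k = 0 then none else bestD a b (k - 1)) →
      loopA n a b (k : Int) res = bestD a b (KKf n a b) := by
  have hm : ((n.toNat : Int)) = n := Int.toNat_of_nonneg hn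
  have hKb : KKf n a b < b.length := KK_lt_length n a b hpre hKm
  have main : ∀ (fuel : Nat) (k : Nat), KKf n a b + 1 - k = fuel → k ≤ KKf n a b + 1 →
      ∀ (res : Option (List Int)), (res = if k = 0 then none else bestD a b (k - 1)) →
      loopA n a b (k : Int) res = bestD a b (KKf n a b) := by
    intro fuel
    induction fuel with
    | zero =>
      intro k hf hk res hres
      have hkm : k = KKf n a b + 1 := by omega
      rw [loopA, dif_pos (by omega)]
      have hnS : ¬ SubPre a b k := by
        rw [hkm]; exact not_subpre_KK_succ n a b hKm
      rw [prefA0_fail a b k hnS, hres, if_neg (by omega)]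
      have hk1 : k - 1 = KKf n a b := by omega
      rw [hk1]
    | succ f ih =>
      intro k hf hk res hres
      have hkK : k ≤ KKf n a b := by omega
      rw [loopA, dif_pos (by omega)]
      have hS : SubPre a b k := subpre_mono a b k (KKf n a b) hkK (subpre_KK n a b)
      rw [prefA0_eq a b k (by omega) hS]
      simp only
      rw [if_pos (by omega)]
      have hcast : ((k : Int) + 1) = ((k + 1 : Nat) : Int) := by push_cast; ring
      rw [findE_DD_eq_max? a b k hS]
      cases hmax : PySem.List.max? (a.filter (candB a b k)) (fun x => x) with
      | none =>
        simp only
        have ht : (b.take k).length = k := List.length_take_of_le (by omega)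
        rw [if_pos (by rw [PySem.List.len_eq, ht]; omega), hcast]
        refine ih (k+1) (by omega) (by omega) res ?_
        rw [hres]
        have h10 : ¬ (k + 1 = 0) := by omega
        rw [if_neg h10, Nat.add_sub_cancel]
        cases k with
        | zero => simp [bestD_none_zero a b hmax]
        | succ j => simp [bestD_none_succ a b j hmax]
      | some e =>
        simp only
        rcases cand_of_max a b k e hmax with ⟨he0, hebk, hec⟩
        have hlen := len_cur2 a b k e (by omega) hS hec
        rw [if_neg (by rw [PySem.List.len_eq, hlen]; omega), hcast]
        refine ih (k+1) (by omega) (by omega) _ ?_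
        rw [if_neg (by omega)]
        simp only [Nat.add_sub_cancel]
        rw [bestD_some a b k e hmax, mxA_DD_eq a b k e hS hec]
  intro k res hk hres
  exact main (KKf n a b + 1 - k) k rfl hk res hres

-- ===== VERDICT (by name: the statement is the Claim_ definition above) =====
theorem solve_spec : Claim_equal_solve := by
  intro n a b _hdom hpre
  unfold Spec_solve solve solve_alt
  by_cases hn : n < 0
  · rw [loopA, dif_neg (by omega), if_pos hn]
  · have hn' : 0 ≤ n := by omega
    have hm : ((n.toNat : Int)) = n := Int.toNat_of_nonneg hn'
    rw [if_neg hn]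
    have hS0 : SubPre a b 0 := fun x hx => by simp at hx
    have hw : whileK n b (PySem.Dict.counter a) 0
        = (DD a b (KKf n a b), ((KKf n a b : Nat) : Int)) := by
      have h := whileK_eq n a b hn' hpre 0 (Nat.zero_le _) hS0
      simpa [DD] using h
    rw [hw]
    simp only
    by_cases hKK : KKf n a b = n.toNat
    · rw [if_pos (by simp [hKK, hm])]
      have h0 := loopA_full n a b hn' hpre hKK 0 none (Nat.zero_le _)
      simp only [Nat.cast_zero] at h0
      rw [h0, PySem.List.slice_to b hn']
    · have hKm : KKf n a b < n.toNat := by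
        have := KK_le n a b
        omega
      rw [if_neg (by simp; omega)]
      by_cases halen : a.length < n.toNat
      · rw [if_pos (by rw [PySem.List.len_eq]; omega)]
        have h0 := loopA_small n a b hn' hpre hKm halen 0 none (by omega)
        simpa using h0
      · rw [if_neg (by rw [PySem.List.len_eq]; omega)]
        have h0 := loopA_best n a b hn' hpre hKm (by omega) 0 none (by omega) (by simp)
        simp only [Nat.cast_zero] at h0
        rw [h0]
        have hsc := scanB_eq n a b hn' hpre hKm (KKf n a b) (DD a b (KKf n a b)) le_rfl
          (fun x => getD_DD a b (KKf n a b) x) (nodup_keys_DD a b (KKf n a b))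
        rw [hsc]
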